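-- pv_equiv track=rewrite | github.com/Tommassino/advent-of-code | 2020/17/code.py | part2
-- ===== SOURCE A (Python) =====
-- from collections import Counter, defaultdict
-- from itertools import product
--
-- class Grid:
--     def __init__(self, active_coordinates, dimension):
--         self.active_coordinates = active_coordinates
--         self.dimension = dimension
--
--     def neighbors(self, coordinate):
--         for move in product([-1, 0, 1], repeat=self.dimension):
--             if set(move) == {0}:
--                 continue
--             yield tuple(sum(x) for x in zip(coordinate, move))
--
--     def tick(self):
--         def should_be_active(coordinate, activation):
--             if coordinate in self.active_coordinates:
--                 return activation == 2 or activation == 3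
--             else:
--                 return activation == 3
--
--         coordinate_activations = Counter(
--             neighbor
--             for coordinate in self.active_coordinates
--             for neighbor in self.neighbors(coordinate)
--         )
--
--         self.active_coordinates = {
--             coordinate
--             for coordinate, activation in coordinate_activations.items()
--             if should_be_active(coordinate, activation)
--         }
--
--     def __repr__(self):
--         x_levels = set(coordinate[0] for coordinate in self.active_coordinates)
--         min_x = min(x_levels)
--         max_x = max(x_levels)
--         y_levels = set(coordinate[1] for coordinate in self.active_coordinates)
--         min_y = min(y_levels)
--         max_y = max(y_levels)
--         rest_coordinates = sorted(list(set(
--             coordinate[2:] for coordinate in self.active_coordinates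
--         )), key=lambda x: list(reversed(x)))
--
--         repr = []
--         repr.append(f"x=[{min_x}, {max_x}], y=[{min_y}, {max_y}]")
--         for space in rest_coordinates:
--             repr.append(f"z={space}")
--             repr.extend(
--                 "".join(
--                     "#" if (x, y, *space) in self.active_coordinates else "."
--                     for x in range(min_x, max_x + 1)
--                 )
--                 for y in range(min_y, max_y + 1)
--             )
--             repr.append(f"\n")
--
--         return "\n".join(repr)
--
-- def part2(puzzle_input):
--     coordinates = {
--         (x, y, 0, 0)
--         for y, line in enumerate(puzzle_input.split())
--         for x, c in enumerate(line)
--         if c == '#'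
--     }
--     grid = Grid(coordinates, 4)
--     for i in range(6):
--         grid.tick()
--     return len(grid.active_coordinates)
-- ===== SOURCE B (Python) =====
-- def part2(puzzle_input):
--     active = {
--         (x, y, 0, 0)
--         for y, line in enumerate(puzzle_input.split())
--         for x, c in enumerate(line)
--         if c == '#'
--     }
--     offsets = [
--         (a, b, c, d)
--         for a in (-1, 0, 1)
--         for b in (-1, 0, 1)
--         for c in (-1, 0, 1)
--         for d in (-1, 0, 1)
--         if (a, b, c, d) != (0, 0, 0, 0)
--     ]
--     for _ in range(6):
--         candidates = set(active)
--         for cell in active: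
--             for o in offsets:
--                 candidates.add((cell[0] + o[0], cell[1] + o[1], cell[2] + o[2], cell[3] + o[3]))
--         new_active = set()
--         for cell in candidates:
--             n = 0
--             for o in offsets:
--                 if (cell[0] + o[0], cell[1] + o[1], cell[2] + o[2], cell[3] + o[3]) in active:
--                     n += 1
--             if (n == 2 or n == 3) if cell in active else n == 3:
--                 new_active.add(cell)
--         active = new_active
--     return len(active)
-- ===== Notes on version B (the rewrite author's own statement) =====
-- stated objective: alternative
-- what changed: tick no longer aggregates a Counter of neighbor emissions and filters its items; instead it enumerates the candidate set (active cells plus all their neighbors) and, for each candidate, counts its active neighbors by membership probes into the current active set.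
import Mathlib
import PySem

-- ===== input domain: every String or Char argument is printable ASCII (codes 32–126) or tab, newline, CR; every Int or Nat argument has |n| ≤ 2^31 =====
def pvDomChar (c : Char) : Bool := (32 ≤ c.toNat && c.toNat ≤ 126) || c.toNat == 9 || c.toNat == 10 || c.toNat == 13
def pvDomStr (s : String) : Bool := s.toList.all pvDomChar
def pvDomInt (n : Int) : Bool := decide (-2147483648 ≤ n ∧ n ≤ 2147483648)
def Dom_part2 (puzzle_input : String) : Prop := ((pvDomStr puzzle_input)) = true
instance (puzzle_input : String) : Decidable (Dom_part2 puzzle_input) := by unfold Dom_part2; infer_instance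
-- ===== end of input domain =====

-- B replaces A's per-tick 'Counter of neighbor emissions, then filter its items' with 'enumerate the
-- candidate set (active ∪ neighbors) and probe each candidate's 80 neighbors against the active set'
-- (alternative decomposition, same exact result; not claimed faster).

-- ===== PORT A =====
-- itertools.product([-1, 0, 1], repeat=4)
def pvProdMoves : List (Int × Int × Int × Int) :=
  ([-1,0,1] : List Int).flatMap fun a =>
  ([-1,0,1] : List Int).flatMap fun b =>
  ([-1,0,1] : List Int).flatMap fun c =>
  ([-1,0,1] : List Int).map fun d => (a, b, c, d)

-- Grid.neighbors: skip the move with set(move) == {0}, i.e. the all-zero move, and add the move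
def pvNbrsA (c : Int × Int × Int × Int) : List (Int × Int × Int × Int) :=
  (pvProdMoves.filter (fun m => !(m == ((0:Int),(0:Int),(0:Int),(0:Int))))).map
    (fun m => (c.1 + m.1, c.2.1 + m.2.1, c.2.2.1 + m.2.2.1, c.2.2.2 + m.2.2.2))

-- tick's local should_be_active(coordinate, activation)
def pvShould (s : List (Int × Int × Int × Int)) (c : Int × Int × Int × Int) (n : Int) : Bool :=
  if s.contains c then (n == 2 || n == 3) else n == 3

-- Grid.tick: Counter of all neighbor emissions, then the set comprehension over its items
def pvTickA (s : List (Int × Int × Int × Int)) : List (Int × Int × Int × Int) :=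
  let counter := PySem.Dict.counter (s.flatMap pvNbrsA)
  PySem.Set.ofList (((counter.items).filter (fun p => pvShould s p.1 p.2)).map (fun p => p.1))

-- the initial set comprehension (identical source text in A and in B, hence one shared helper)
def pvParse (input : String) : List (Int × Int × Int × Int) :=
  PySem.Set.ofList
    ((PySem.List.enumerate (PySem.Str.split₀ input) 0).flatMap fun yl =>
      (PySem.List.enumerate yl.2.toList 0).filterMap fun xc =>
        if xc.2 == '#' then some (xc.1, yl.1, (0:Int), (0:Int)) else none)

def part2 (puzzle_input : String) : Int :=
  (((List.range 6).foldl (fun g _ => pvTickA g) (pvParse puzzle_input)).length : Int)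

-- ===== PORT B =====
-- the precomputed offsets list: [(a,b,c,d) for ... if (a,b,c,d) != (0,0,0,0)]
def pvOffsets : List (Int × Int × Int × Int) :=
  ([-1,0,1] : List Int).flatMap fun a =>
  ([-1,0,1] : List Int).flatMap fun b =>
  ([-1,0,1] : List Int).flatMap fun c =>
  ([-1,0,1] : List Int).filterMap fun d =>
    if (a,b,c,d) == ((0:Int),(0:Int),(0:Int),(0:Int)) then none else some (a,b,c,d)

-- (cell[0]+o[0], cell[1]+o[1], cell[2]+o[2], cell[3]+o[3])
def pvAdd (c o : Int × Int × Int × Int) : Int × Int × Int × Int :=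
  (c.1 + o.1, c.2.1 + o.2.1, c.2.2.1 + o.2.2.1, c.2.2.2 + o.2.2.2)

-- one tick of B: build candidates = active ∪ neighbors, then probe each candidate
def pvTickB (s : List (Int × Int × Int × Int)) : List (Int × Int × Int × Int) :=
  let cands := s.foldl
    (fun acc cell => pvOffsets.foldl (fun a2 o => PySem.Set.add a2 (pvAdd cell o)) acc)
    (PySem.Set.ofList s)
  cands.foldl (fun acc cell =>
    let n := pvOffsets.foldl (fun k o => if s.contains (pvAdd cell o) then k + 1 else k) (0 : Int)
    if (if s.contains cell then (n == 2 || n == 3) else n == 3) then PySem.Set.add acc cell else acc)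
    PySem.Set.empty

def part2_alt (puzzle_input : String) : Int :=
  (((List.range 6).foldl (fun g _ => pvTickB g) (pvParse puzzle_input)).length : Int)

-- ===== PRECONDITION & SPEC =====
def Spec_part2 (puzzle_input : String) (out : Int) : Prop := out = part2_alt puzzle_input
instance (puzzle_input : String) (out : Int) : Decidable (Spec_part2 puzzle_input out) := by unfold Spec_part2; infer_instance

-- ===== CLAIM (what is proved, stated in full; the proofs are below) =====
def Claim_equal_part2 : Prop := ∀ (puzzle_input : String), Dom_part2 puzzle_input → Spec_part2 puzzle_input (part2 puzzle_input)

-- ===== LEMMAS AND PROOFS =====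

-- proof-side abbreviations
def pvSub (a b : Int × Int × Int × Int) : Int × Int × Int × Int :=
  (a.1 - b.1, a.2.1 - b.2.1, a.2.2.1 - b.2.2.1, a.2.2.2 - b.2.2.2)

def pvNbrs (c : Int × Int × Int × Int) : List (Int × Int × Int × Int) :=
  pvOffsets.map (pvAdd c)

def pvCnt (s : List (Int × Int × Int × Int)) (c : Int × Int × Int × Int) : Nat :=
  pvOffsets.countP (fun o => decide (pvAdd c o ∈ s))

lemma offs_eq : pvProdMoves.filter (fun m => !(m == ((0:Int),(0:Int),(0:Int),(0:Int)))) = pvOffsets := by decide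

lemma offs_nodup : pvOffsets.Nodup := by decide

lemma offs_symm : ∀ m ∈ pvOffsets, ((-m.1, -m.2.1, -m.2.2.1, -m.2.2.2) : Int × Int × Int × Int) ∈ pvOffsets := by decide

lemma nbrsA_eq (c : Int × Int × Int × Int) : pvNbrsA c = pvNbrs c := by
  unfold pvNbrsA pvNbrs pvAdd
  rw [offs_eq]

lemma pvAdd_sub (c a : Int × Int × Int × Int) : pvAdd c (pvSub a c) = a := by
  obtain ⟨a1, a2, a3, a4⟩ := a; obtain ⟨c1, c2, c3, c4⟩ := c
  simp [pvAdd, pvSub]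

lemma pvSub_add (c o : Int × Int × Int × Int) : pvSub (pvAdd c o) c = o := by
  obtain ⟨o1, o2, o3, o4⟩ := o; obtain ⟨c1, c2, c3, c4⟩ := c
  simp [pvAdd, pvSub]

lemma pvSub_swap (a c : Int × Int × Int × Int) :
    pvSub c a = ((-(pvSub a c).1, -(pvSub a c).2.1, -(pvSub a c).2.2.1, -(pvSub a c).2.2.2) : Int × Int × Int × Int) := by
  obtain ⟨a1, a2, a3, a4⟩ := a; obtain ⟨c1, c2, c3, c4⟩ := c
  simp [pvSub]

lemma offs_mem_symm (a c : Int × Int × Int × Int) :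
    pvSub a c ∈ pvOffsets ↔ pvSub c a ∈ pvOffsets := by
  constructor
  · intro h; rw [pvSub_swap a c]; exact offs_symm _ h
  · intro h; rw [pvSub_swap c a]; exact offs_symm _ h

lemma mem_nbrs (a c : Int × Int × Int × Int) : a ∈ pvNbrs c ↔ pvSub a c ∈ pvOffsets := by
  unfold pvNbrs
  rw [List.mem_map]
  constructor
  · rintro ⟨o, ho, rfl⟩; rwa [pvSub_add]
  · intro h; exact ⟨pvSub a c, h, pvAdd_sub c a⟩

lemma pvAdd_inj (c : Int × Int × Int × Int) : Function.Injective (pvAdd c) := by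
  intro o1 o2 h
  obtain ⟨x1, x2, x3, x4⟩ := o1; obtain ⟨y1, y2, y3, y4⟩ := o2; obtain ⟨c1, c2, c3, c4⟩ := c
  simp [pvAdd] at h
  obtain ⟨h1, h2, h3, h4⟩ := h
  simp; omega

lemma nbrs_nodup (c : Int × Int × Int × Int) : (pvNbrs c).Nodup :=
  offs_nodup.map (pvAdd_inj c)

lemma count_nbrs (a c : Int × Int × Int × Int) :
    (pvNbrs a).count c = if pvSub c a ∈ pvOffsets then 1 else 0 := by
  split
  · next h =>
    exact List.count_eq_one_of_mem (nbrs_nodup a) ((mem_nbrs c a).2 h)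
  · next h =>
    exact List.count_eq_zero.2 (fun hc => h ((mem_nbrs c a).1 hc))

lemma count_flatMap (s : List (Int × Int × Int × Int)) (c : Int × Int × Int × Int) :
    (s.flatMap pvNbrsA).count c = s.countP (fun a => decide (pvSub c a ∈ pvOffsets)) := by
  induction s with
  | nil => simp
  | cons x t ih =>
    rw [List.flatMap_cons, List.count_append, List.countP_cons, ih, nbrsA_eq, count_nbrs]
    split
    · simp_all
      omega
    · simp_all

-- intersection-count symmetry for Nodup lists
lemma countP_mem_symm (s t : List (Int × Int × Int × Int)) (hs : s.Nodup) (ht : t.Nodup) :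
    s.countP (fun a => decide (a ∈ t)) = t.countP (fun a => decide (a ∈ s)) := by
  rw [List.countP_eq_length_filter, List.countP_eq_length_filter]
  have n1 : (s.filter (fun a => decide (a ∈ t))).Nodup := hs.filter _
  have n2 : (t.filter (fun a => decide (a ∈ s))).Nodup := ht.filter _
  have h1 : (s.filter (fun a => decide (a ∈ t))).toFinset = s.toFinset ∩ t.toFinset := by
    ext x; simp
  have h2 : (t.filter (fun a => decide (a ∈ s))).toFinset = t.toFinset ∩ s.toFinset := by
    ext x; simp [and_comm]
  rw [← List.toFinset_card_of_nodup n1, ← List.toFinset_card_of_nodup n2, h1, h2, Finset.inter_comm]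

-- the double count: emissions of s landing on c = active neighbors of c (s without duplicates)
lemma cnt_eq (s : List (Int × Int × Int × Int)) (hs : s.Nodup) (c : Int × Int × Int × Int) :
    (s.flatMap pvNbrsA).count c = pvCnt s c := by
  rw [count_flatMap]
  have h1 : s.countP (fun a => decide (pvSub c a ∈ pvOffsets)) = s.countP (fun a => decide (a ∈ pvNbrs c)) := by
    apply List.countP_congr
    intro a _
    simp [mem_nbrs, offs_mem_symm]
  rw [h1, countP_mem_symm s (pvNbrs c) hs (nbrs_nodup c)]
  unfold pvNbrs pvCnt
  rw [List.countP_map]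
  rfl

lemma mem_tickA (s : List (Int × Int × Int × Int)) (c : Int × Int × Int × Int) :
    c ∈ pvTickA s ↔ (c ∈ s.flatMap pvNbrsA ∧ pvShould s c (((s.flatMap pvNbrsA).count c : Nat) : Int) = true) := by
  simp only [pvTickA, PySem.Set.mem_ofList, List.mem_map, List.mem_filter, PySem.Dict.items_counter]
  constructor
  · rintro ⟨p, ⟨⟨k, hk, rfl⟩, hsh⟩, h1⟩
    obtain rfl : k = c := h1
    exact ⟨hk, hsh⟩
  · rintro ⟨hm, hsh⟩
    exact ⟨(c, (List.count c (List.flatMap pvNbrsA s) : Int)), ⟨⟨c, hm, rfl⟩, hsh⟩, rfl⟩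

lemma mem_foldl_update (s init : List (Int × Int × Int × Int)) (x : Int × Int × Int × Int) :
    x ∈ s.foldl (fun acc cell => PySem.Set.update acc (pvNbrs cell)) init ↔
      x ∈ init ∨ ∃ a ∈ s, x ∈ pvNbrs a := by
  induction s generalizing init with
  | nil => simp
  | cons h t ih =>
    rw [List.foldl_cons, ih]
    simp [PySem.Set.mem_update]
    tauto

lemma mem_tickB (s : List (Int × Int × Int × Int)) (c : Int × Int × Int × Int) :
    c ∈ pvTickB s ↔ ((c ∈ s ∨ ∃ a ∈ s, c ∈ pvNbrs a) ∧ pvShould s c ((pvCnt s c : Nat) : Int) = true) := by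
  unfold pvTickB
  have hinner : ∀ (acc : List (Int × Int × Int × Int)) (cell : Int × Int × Int × Int),
      pvOffsets.foldl (fun a2 o => PySem.Set.add a2 (pvAdd cell o)) acc =
        PySem.Set.update acc (pvNbrs cell) := by
    intro acc cell
    unfold pvNbrs PySem.Set.update
    rw [List.foldl_map]
  simp only [hinner]
  have hn : ∀ cell, pvOffsets.foldl (fun k o => if s.contains (pvAdd cell o) then k + 1 else k) (0 : Int) =
      ((pvCnt s cell : Nat) : Int) := by
    intro cell
    rw [PySem.List.foldl_if_add_one]
    unfold pvCnt
    have : pvOffsets.countP (fun o => s.contains (pvAdd cell o)) =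
        pvOffsets.countP (fun o => decide (pvAdd cell o ∈ s)) := by
      apply List.countP_congr; intro o _; simp
    rw [this]; ring
  simp only [hn]
  rw [PySem.List.foldl_if_eq_foldl_filter]
  have : (PySem.Set.empty : List (Int × Int × Int × Int)) = [] := rfl
  rw [this, ← PySem.Set.ofList_eq_foldl, PySem.Set.mem_ofList, List.mem_filter]
  rw [mem_foldl_update, PySem.Set.mem_ofList]
  unfold pvShould
  tauto

lemma should_pos (s : List (Int × Int × Int × Int)) (c : Int × Int × Int × Int) (n : Nat)
    (h : pvShould s c ((n : Nat) : Int) = true) : n = 2 ∨ n = 3 := by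
  unfold pvShould at h
  split at h <;> simp at h <;> omega

lemma should_congr (sa sb : List (Int × Int × Int × Int)) (hm : ∀ x, x ∈ sa ↔ x ∈ sb)
    (c : Int × Int × Int × Int) (n : Int) : pvShould sa c n = pvShould sb c n := by
  unfold pvShould
  have : sa.contains c = sb.contains c := by
    simp [hm c]
  rw [this]

lemma cnt_congr (sa sb : List (Int × Int × Int × Int)) (hm : ∀ x, x ∈ sa ↔ x ∈ sb)
    (c : Int × Int × Int × Int) : pvCnt sa c = pvCnt sb c := by
  unfold pvCnt
  apply List.countP_congr
  intro o _
  simp [hm]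

lemma tick_equiv (sa sb : List (Int × Int × Int × Int)) (hs : sa.Nodup)
    (hm : ∀ x, x ∈ sa ↔ x ∈ sb) (c : Int × Int × Int × Int) :
    (c ∈ pvTickA sa ↔ c ∈ pvTickB sb) := by
  rw [mem_tickA, mem_tickB, ← cnt_congr sa sb hm c, ← should_congr sa sb hm c, ← cnt_eq sa hs c]
  constructor
  · rintro ⟨hmem, hsh⟩
    refine ⟨?_, hsh⟩
    by_cases hc : c ∈ sa
    · exact Or.inl ((hm c).1 hc)
    · right
      have hpos : 0 < (sa.flatMap pvNbrsA).count c := List.count_pos_iff.2 hmem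
      rw [cnt_eq sa hs c] at hpos
      unfold pvCnt at hpos
      obtain ⟨o, ho, hoin⟩ := List.countP_pos_iff.1 hpos
      refine ⟨pvAdd c o, (hm _).1 (of_decide_eq_true hoin), ?_⟩
      rw [mem_nbrs, offs_mem_symm, pvSub_add]
      exact ho
  · rintro ⟨_, hsh⟩
    refine ⟨?_, hsh⟩
    have h23 := should_pos sa c ((sa.flatMap pvNbrsA).count c) hsh
    exact List.count_pos_iff.1 (by omega)

lemma tickA_nodup (s : List (Int × Int × Int × Int)) : (pvTickA s).Nodup := by
  unfold pvTickA
  exact PySem.Set.nodup_ofList _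

lemma tickB_nodup (s : List (Int × Int × Int × Int)) : (pvTickB s).Nodup := by
  unfold pvTickB
  rw [PySem.List.foldl_if_eq_foldl_filter]
  have : (PySem.Set.empty : List (Int × Int × Int × Int)) = [] := rfl
  rw [this, ← PySem.Set.ofList_eq_foldl]
  exact PySem.Set.nodup_ofList _

lemma iterate_equiv (l : List Nat) (sa sb : List (Int × Int × Int × Int))
    (hsa : sa.Nodup) (hsb : sb.Nodup) (hm : ∀ x, x ∈ sa ↔ x ∈ sb) :
    (l.foldl (fun g _ => pvTickA g) sa).Nodup ∧
    (l.foldl (fun g _ => pvTickB g) sb).Nodup ∧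
    (∀ x, x ∈ l.foldl (fun g _ => pvTickA g) sa ↔ x ∈ l.foldl (fun g _ => pvTickB g) sb) := by
  induction l generalizing sa sb with
  | nil => exact ⟨hsa, hsb, hm⟩
  | cons h t ih =>
    rw [List.foldl_cons, List.foldl_cons]
    exact ih (pvTickA sa) (pvTickB sb) (tickA_nodup sa) (tickB_nodup sb)
      (tick_equiv sa sb hsa hm)

-- ===== VERDICT (by name: the statement is the Claim_ definition above) =====
theorem part2_spec : Claim_equal_part2 := by
  intro puzzle_input _
  unfold Spec_part2 part2 part2_alt
  obtain ⟨hna, hnb, hm⟩ := iterate_equiv (List.range 6) (pvParse puzzle_input) (pvParse puzzle_input)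
    (PySem.Set.nodup_ofList _) (PySem.Set.nodup_ofList _) (fun _ => Iff.rfl)
  have : ((List.range 6).foldl (fun g _ => pvTickA g) (pvParse puzzle_input)).Perm
      ((List.range 6).foldl (fun g _ => pvTickB g) (pvParse puzzle_input)) :=
    (List.perm_ext_iff_of_nodup hna hnb).2 hm
  have hl := ((List.perm_ext_iff_of_nodup hna hnb).2 hm).length_eq
  exact congrArg (fun n : Nat => (n : Int)) hl
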